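-- pv_equiv track=rewrite | github.com/Arselena/higher-school | Level_0_13.py | UFO
-- ===== SOURCE A (Python) =====
-- def UFO(N, data, octal):
--     try:
--         def trans(num, SS):
--             arr = list(int(d) for d in str(num))
--             n = len(arr)
--             sum = 0
--             for i in range(n):
--                 if SS == 8:
--                     assert arr[i] < 8  # исключаем цифры 8 и 9 в восьмеричной CC
--                 sum += arr[i] * (SS ** (n - 1))
--                 n -= 1
--             return sum
--
--         assert type(N) is int and N == len(data)
--         assert type(octal) is bool
--         for d in data:
--             assert type(d) is int
--
--         if octal == True:
--             SS = 8
--         else: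
--             SS = 16
--
--         ARR = []
--         for d in data:
--             ARR.append(trans(d, SS))
--
--         return ARR
--
--     except AssertionError:
--         pass
-- ===== SOURCE B (Python) =====
-- def UFO(N, data, octal):
--     # Horner-scheme re-implementation: one accumulator per number, no powers.
--     if N != len(data):
--         return None
--     base = 8 if octal else 16
--     out = []
--     for d in data:
--         acc = 0
--         for ch in str(d):  # negative d: int('-') raises ValueError, as in the original
--             dig = int(ch)
--             if base == 8 and dig > 7:  # octal rejects digits 8 and 9
--                 return None
--             acc = acc * base + dig
--         out.append(acc)
--     return out
-- ===== Notes on version B (the rewrite author's own statement) =====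
-- stated objective: simpler
-- what changed: The per-digit power summation (sum += digit * base**(n-1) with a decremented n, recomputing a power for every digit) is replaced by a single left-to-right Horner accumulator acc = acc*base + digit; the outer validation collapses to one length check and an early return replaces the exception-driven None.
import Mathlib
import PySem

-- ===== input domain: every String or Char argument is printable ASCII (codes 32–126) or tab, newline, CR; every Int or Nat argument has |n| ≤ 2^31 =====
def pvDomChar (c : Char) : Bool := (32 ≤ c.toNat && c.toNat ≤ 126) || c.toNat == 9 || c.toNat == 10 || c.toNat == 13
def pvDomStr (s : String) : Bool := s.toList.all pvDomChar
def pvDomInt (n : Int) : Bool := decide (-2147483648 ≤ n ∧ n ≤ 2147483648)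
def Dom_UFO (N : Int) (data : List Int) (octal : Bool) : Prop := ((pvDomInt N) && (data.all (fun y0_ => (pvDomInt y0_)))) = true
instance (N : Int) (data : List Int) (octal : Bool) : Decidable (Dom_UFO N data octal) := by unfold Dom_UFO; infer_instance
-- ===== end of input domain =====

-- B replaces A's per-digit power summation (digit * SS**(n-1) with decremented n) by a single
-- left-to-right Horner accumulator per number; objective: simpler.

-- ===== PORT A =====
-- trans(num, SS): arr = [int(d) for d in str(num)]; indexed loop summing arr[i]*SS**(n-1), n -= 1.
-- int(d) raising ValueError (negative num: the '-' character) is `none` here; those inputs are outside Pre_.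
-- The assert arr[i] < 8 under SS == 8 raises AssertionError, which UFO catches and turns into None (`none`).
-- one iteration of the `for i in range(n)` loop: state (sum, n)
def astep (arr : List Int) (SS : Int) (st : Int × Int) (i : Int) : Option (Int × Int) :=
  match PySem.List.pyGet? arr i with
  | none => none
  | some a =>
    if SS = 8 ∧ ¬ (a < 8) then none   -- assert arr[i] < 8 (only when SS == 8)
    -- exponent st.2 - 1 is ≥ 0 throughout the loop, so .toNat is exact here
    else some (st.1 + a * SS ^ (st.2 - 1).toNat, st.2 - 1)

def transA (num SS : Int) : Option Int :=
  match (PySem.Int.toChars num).mapM (fun c => PySem.Int.ofChars? [c]) with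
  | none => none
  | some arr =>
    ((PySem.List.pyRange 0 (arr.length : Int) 1).foldlM
      (astep arr SS) ((0 : Int), (arr.length : Int))).map Prod.fst

def UFO (N : Int) (data : List Int) (octal : Bool) : Option (List Int) :=
  -- assert N == len(data) (type asserts hold by typing); AssertionError is caught → None
  if N = (data.length : Int) then
    let SS : Int := if octal then 8 else 16
    -- ARR = []; for d in data: ARR.append(trans(d, SS))
    data.foldlM (fun ARR d => (transA d SS).map (fun v => ARR ++ [v])) []
  else none

-- ===== PORT B =====
-- one Horner pass over the characters of str(d); `return None` on an octal digit 8/9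
-- one Horner step on one character of str(d)
def bstep (base : Int) (acc : Int) (c : Char) : Option Int :=
  match PySem.Int.ofChars? [c] with
  | none => none                  -- ValueError on '-' for negative d, as in A; outside Pre_
  | some dig =>
    if base = 8 ∧ 7 < dig then none   -- octal rejects digits 8 and 9
    else some (acc * base + dig)

def transB (d base : Int) : Option Int :=
  (PySem.Int.toChars d).foldlM (bstep base) (0 : Int)

def UFO_alt (N : Int) (data : List Int) (octal : Bool) : Option (List Int) :=
  if N = (data.length : Int) then
    data.mapM (fun d => transB d (if octal then 8 else 16))
  else none

-- ===== PRECONDITION & SPEC =====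
-- Pre_ excludes exactly the inputs on which Python A raises an uncaught ValueError:
-- a negative element of data when N == len(data) (int('-') fails while digit-parsing str(d)).
def Pre_UFO (N : Int) (data : List Int) (octal : Bool) : Prop :=
  N = (data.length : Int) → ∀ d ∈ data, 0 ≤ d
instance (N : Int) (data : List Int) (octal : Bool) : Decidable (Pre_UFO N data octal) := by unfold Pre_UFO; infer_instance

def pvWitness_UFO : Int × List Int × Bool := (2, ([9, 15], false))

def Spec_UFO (N : Int) (data : List Int) (octal : Bool) (out : Option (List Int)) : Prop := out = UFO_alt N data octal
instance (N : Int) (data : List Int) (octal : Bool) (out : Option (List Int)) : Decidable (Spec_UFO N data octal out) := by unfold Spec_UFO; infer_instance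

-- ===== CLAIM (what is proved, stated in full; the proofs are below) =====
def Claim_equal_UFO : Prop := ∀ (N : Int) (data : List Int) (octal : Bool), Dom_UFO N data octal → Pre_UFO N data octal → Spec_UFO N data octal (UFO N data octal)


-- ===== LEMMAS AND PROOFS =====

-- Horner value of a digit list over base SS, starting from acc (the common closed form)
def pvH (SS : Int) (arr : List Int) (acc : Int) : Int :=
  arr.foldl (fun x a => x * SS + a) acc

-- "the run aborts": base is 8 and some digit exceeds 7
def pvBad (SS : Int) (arr : List Int) : Bool :=
  decide (SS = 8) && arr.any (fun a => decide (7 < a))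

theorem pvH_shift (SS : Int) (t : List Int) (acc : Int) :
    pvH SS t acc = acc * SS ^ t.length + pvH SS t 0 := by
  induction t generalizing acc with
  | nil => simp [pvH]
  | cons b t' ih =>
    simp only [pvH, List.foldl_cons] at *
    rw [ih (acc * SS + b), ih (0 * SS + b)]
    simp only [List.length_cons, pow_succ]
    ring

theorem pvAloop (SS : Int) (t : List Int) : ∀ (pre : List Int) (s : Int),
    (PySem.List.pyRange (pre.length : Int) ((pre.length + t.length : Nat) : Int) 1).foldlM
      (astep (pre ++ t) SS) (s, (t.length : Int))
    = if pvBad SS t then none else some (s + pvH SS t 0, 0) := by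
  induction t with
  | nil =>
    intro pre s
    simp [PySem.List.pyRange, pvBad, pvH]
  | cons a t' ih =>
    intro pre s
    have hlt : (pre.length : Int) < ((pre.length + (a :: t').length : Nat) : Int) := by
      simp only [List.length_cons]; omega
    rw [PySem.List.pyRange_one_cons hlt, List.foldlM_cons]
    have hget : PySem.List.pyGet? (pre ++ a :: t') (pre.length : Int) = some a := by
      rw [PySem.List.pyGet?_natCast]
      simp
    by_cases hbad : SS = 8 ∧ ¬ a < 8
    · simp only [astep, hget]
      rw [if_pos hbad]
      obtain ⟨h8, h7⟩ := hbad
      have h7' : 7 < a := by omega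
      have : pvBad SS (a :: t') = true := by simp [pvBad, h8, h7']
      simp [this]
    · simp only [astep, hget]
      rw [if_neg hbad]
      have hexp : ((((a :: t').length : Nat) : Int) - 1).toNat = t'.length := by
        simp
      have hsnd : ((((a :: t').length : Nat) : Int) - 1) = (t'.length : Int) := by
        simp
      rw [hexp, hsnd]
      have harr : pre ++ a :: t' = (pre ++ [a]) ++ t' := by simp
      have hk : (pre.length : Int) + 1 = ((pre ++ [a]).length : Int) := by simp
      have hk2 : ((pre.length + (a :: t').length : Nat) : Int)
          = (((pre ++ [a]).length + t'.length : Nat) : Int) := by simp; omega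
      rw [show (Option.some (s + a * SS ^ t'.length, (t'.length : Int))
            >>= fun init => (PySem.List.pyRange ((pre.length : Int) + 1)
              ((pre.length + (a :: t').length : Nat) : Int) 1).foldlM (astep (pre ++ a :: t') SS) init)
          = (PySem.List.pyRange ((pre.length : Int) + 1)
              ((pre.length + (a :: t').length : Nat) : Int) 1).foldlM (astep (pre ++ a :: t') SS)
              (s + a * SS ^ t'.length, (t'.length : Int)) from rfl]
      rw [harr, hk, hk2, ih (pre ++ [a]) (s + a * SS ^ t'.length)]
      have hbadeq : pvBad SS (a :: t') = pvBad SS t' := by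
        by_cases h8 : SS = 8
        · have : a < 8 := by tauto
          simp [pvBad, h8]
          omega
        · simp [pvBad, h8]
      rw [hbadeq]
      by_cases hb : pvBad SS t' = true
      · simp [hb]
      · simp only [Bool.not_eq_true] at hb
        simp only [hb, if_neg Bool.false_ne_true]
        have : pvH SS (a :: t') 0 = a * SS ^ t'.length + pvH SS t' 0 := by
          simp only [pvH, List.foldl_cons, zero_mul, zero_add]
          exact pvH_shift SS t' a
        rw [this]
        ring_nf

theorem pvBloop (SS : Int) (cs : List Char) : ∀ (acc : Int),
    cs.foldlM (bstep SS) acc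
    = match cs.mapM (fun c => PySem.Int.ofChars? [c]) with
      | none => none
      | some arr => if pvBad SS arr then none else some (pvH SS arr acc) := by
  induction cs with
  | nil => intro acc; simp [pvBad, pvH]
  | cons c cs' ih =>
    intro acc
    rw [List.foldlM_cons, List.mapM_cons]
    cases hc : PySem.Int.ofChars? [c] with
    | none => simp [bstep, hc]
    | some dig =>
      by_cases hbad : SS = 8 ∧ 7 < dig
      · cases hm : cs'.mapM (fun c => PySem.Int.ofChars? [c]) with
        | none => simp [bstep, hc, hbad]
        | some arr =>
          have hb : pvBad 8 (dig :: arr) = true := by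
            simp [pvBad]
            exact Or.inl hbad.2
          simp [bstep, hc, hbad, hb]
      · have hstep : bstep SS acc c = some (acc * SS + dig) := by
          simp [bstep, hc, hbad]
        rw [hstep]
        show cs'.foldlM (bstep SS) (acc * SS + dig) = _
        rw [ih (acc * SS + dig)]
        cases hm : cs'.mapM (fun c => PySem.Int.ofChars? [c]) with
        | none => simp
        | some arr =>
          have hbadeq : pvBad SS (dig :: arr) = pvBad SS arr := by
            by_cases h8 : SS = 8
            · have hd : ¬ 7 < dig := by tauto
              simp [pvBad, h8, hd]
            · simp [pvBad, h8]
          show (if pvBad SS arr = true then none else some (pvH SS arr (acc * SS + dig))) =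
               (if pvBad SS (dig :: arr) = true then none else some (pvH SS (dig :: arr) acc))
          rw [hbadeq]
          rfl

theorem pvTrans_eq (num SS : Int) : transA num SS = transB num SS := by
  unfold transA transB
  rw [pvBloop SS (PySem.Int.toChars num) 0]
  cases hm : (PySem.Int.toChars num).mapM (fun c => PySem.Int.ofChars? [c]) with
  | none => simp
  | some arr =>
    show ((PySem.List.pyRange 0 (arr.length : Int) 1).foldlM
        (astep arr SS) ((0 : Int), (arr.length : Int))).map Prod.fst
      = if pvBad SS arr = true then none else some (pvH SS arr 0)
    have h := pvAloop SS arr [] 0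
    simp only [List.nil_append, List.length_nil, Nat.cast_zero, zero_add] at h
    rw [h]
    by_cases hb : pvBad SS arr = true
    · simp [hb]
    · simp only [Bool.not_eq_true] at hb
      simp [hb]

theorem pvOuter (f : Int → Option Int) (l : List Int) : ∀ (acc : List Int),
    l.foldlM (fun ARR d => (f d).map (fun v => ARR ++ [v])) acc
    = (l.mapM f).map (fun t => acc ++ t) := by
  induction l with
  | nil => intro acc; simp
  | cons d l' ih =>
    intro acc
    rw [List.foldlM_cons, List.mapM_cons]
    cases hf : f d with
    | none => simp
    | some v =>
      simp only [Option.map_some]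
      show l'.foldlM _ (acc ++ [v]) = _
      rw [ih (acc ++ [v])]
      cases hm : l'.mapM f with
      | none => simp
      | some t => simp

-- ===== VERDICT (by name: the statement is the Claim_ definition above) =====
theorem UFO_spec : Claim_equal_UFO := by
  intro N data octal _ _
  unfold Spec_UFO UFO UFO_alt
  by_cases hN : N = (data.length : Int)
  · simp only [hN, if_pos]
    rw [pvOuter]
    have : (fun d => transA d (if octal then (8:Int) else 16))
         = (fun d => transB d (if octal then (8:Int) else 16)) := by
      funext d; exact pvTrans_eq d _
    rw [this]
    cases hm : data.mapM (fun d => transB d (if octal then (8:Int) else 16)) with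
    | none => simp
    | some t => simp
  · simp [hN]
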